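-- pv_equiv track=rewrite | github.com/felixpeng24/algo | 263.py | is_valid_sentence
-- ===== SOURCE A (Python) =====
-- def is_terminal(char):
--     return char in '.?!‽'
--
-- def is_separator(char):
--     return char in ',;:'
--
-- def is_valid_sentence(sentence):
--     if not sentence:
--         return False
--
--     # Rule 1: Must start with capital letter
--     if not sentence[0].isupper():
--         return False
--
--     i = 1
--     n = len(sentence)
--
--     # Rule 2: After the capital, must be lowercase or space
--     if i < n and not (sentence[i].islower() or sentence[i] == ' '):
--         return False
--
--     last_char = sentence[0]
--     while i < n:
--         c = sentence[i]
--
--         if c == ' ':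
--             # Rule 3: Only one space between words
--             if last_char == ' ':
--                 return False
--             if i + 1 < n and not sentence[i + 1].islower():
--                 return False
--         elif is_terminal(c):
--             # Rule 4: Must be no space before terminal mark
--             if last_char == ' ':
--                 return False
--             if i != n - 1:
--                 return False  # terminal mark must be at the end
--         elif c.islower() or is_separator(c):
--             pass
--         else:
--             return False
--
--         last_char = c
--         i += 1
--
--     # Must end with a terminal mark
--     return is_terminal(sentence[-1])
-- ===== SOURCE B (Python) =====
-- def is_terminal(char):
--     return char in '.?!‽'
--
-- def is_separator(char):
--     return char in ',;:'
--
-- def is_valid_sentence(sentence):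
--     # Independent rule passes over the string, AND-ed together.
--     if not sentence:
--         return False
--     body = sentence[1:]
--     pairs = list(zip(sentence, body))          # (s[i-1], s[i]) for i = 1..n-1
--     return (sentence[0].isupper()
--             and is_terminal(sentence[-1])
--             and (not body or body[0].islower() or body[0] == ' ')
--             and all(c == ' ' or c.islower() or is_separator(c) or is_terminal(c)
--                     for c in body)
--             and all(b != ' ' for a, b in pairs if a == ' ')
--             and all(b.islower() for a, b in zip(body, body[1:]) if a == ' ')
--             and all(a != ' ' for a, b in pairs if is_terminal(b))
--             and not any(is_terminal(c) for c in body[:-1]))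
-- ===== Notes on version B (the rewrite author's own statement) =====
-- stated objective: alternative
-- what changed: A's single stateful while-loop carrying last_char with in-loop look-aheads and early returns is replaced by a pure conjunction of independent rule passes: one membership pass over the tail, three adjacent-pair (zip) passes for the space/terminal context rules, and direct checks of the first, second and last characters.
import Mathlib
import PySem

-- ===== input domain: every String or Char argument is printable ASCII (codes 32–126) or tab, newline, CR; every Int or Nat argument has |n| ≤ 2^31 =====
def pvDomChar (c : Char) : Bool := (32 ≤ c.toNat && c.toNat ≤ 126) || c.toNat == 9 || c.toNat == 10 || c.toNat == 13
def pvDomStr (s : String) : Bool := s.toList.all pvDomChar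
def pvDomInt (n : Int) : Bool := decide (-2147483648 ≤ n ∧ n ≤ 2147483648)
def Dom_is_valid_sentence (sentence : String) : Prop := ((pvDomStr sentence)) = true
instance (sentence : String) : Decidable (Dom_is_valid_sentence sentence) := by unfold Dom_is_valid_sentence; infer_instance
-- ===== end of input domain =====

-- B re-decomposes A's single stateful while-scan into independent per-rule passes AND-ed together (objective: alternative decomposition; same O(n) cost).

-- ===== PORT A =====
-- helpers shared by both ports (is_terminal / is_separator from the Python module)
def isTerminalC (c : Char) : Bool := c = '.' || c = '?' || c = '!' || c = '‽'

def isSeparatorC (c : Char) : Bool := c = ',' || c = ';' || c = ':'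

-- A's while-loop: `prev` is `last_char`, the argument list is the remaining suffix s[i:].
def aLoop (prev : Char) : List Char → Bool
  | [] => true
  | c :: rest =>
    if c = ' ' then
      if prev = ' ' then false
      else match rest with                       -- the `i + 1 < n` look-ahead
        | d :: _ => if !(PySem.Chars.islower d) then false else aLoop c rest
        | [] => aLoop c rest
    else if isTerminalC c then
      if prev = ' ' then false
      else if rest ≠ [] then false               -- terminal mark must be at the end
      else aLoop c rest
    else if PySem.Chars.islower c || isSeparatorC c then aLoop c rest
    else false

def is_valid_sentence (sentence : String) : Bool :=
  match sentence.toList with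
  | [] => false
  | c0 :: rest =>
    if !(PySem.Chars.isupper c0) then false
    else match rest with
      | c1 :: _ =>
        if !(PySem.Chars.islower c1 || c1 = ' ') then false
        else if aLoop c0 rest then isTerminalC (rest.getLastD c0) else false
      | [] => isTerminalC c0                     -- loop skipped; return is_terminal(sentence[-1])

-- ===== PORT B =====
def is_valid_sentence_alt (sentence : String) : Bool :=
  match sentence.toList with
  | [] => false
  | head :: body =>
    let pairs := (head :: body).zip body         -- (s[i-1], s[i]) for i = 1..n-1
    PySem.Chars.isupper head
    && isTerminalC (body.getLastD head)
    && (body.isEmpty || PySem.Chars.islower (body.headD ' ') || body.headD ' ' = ' ')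
    && body.all (fun c => c = ' ' || PySem.Chars.islower c || isSeparatorC c || isTerminalC c)
    && pairs.all (fun p => !(p.1 = ' ') || !(p.2 = ' '))
    && (body.zip body.tail).all (fun p => !(p.1 = ' ') || PySem.Chars.islower p.2)
    && pairs.all (fun p => !(isTerminalC p.2) || !(p.1 = ' '))
    && !(body.dropLast.any isTerminalC)

-- ===== PRECONDITION & SPEC =====
def Spec_is_valid_sentence (sentence : String) (out : Bool) : Prop := out = is_valid_sentence_alt sentence
instance (sentence : String) (out : Bool) : Decidable (Spec_is_valid_sentence sentence out) := by unfold Spec_is_valid_sentence; infer_instance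

-- ===== CLAIM (what is proved, stated in full; the proofs are below) =====
def Claim_equal_is_valid_sentence : Prop := ∀ (sentence : String), Dom_is_valid_sentence sentence → Spec_is_valid_sentence sentence (is_valid_sentence sentence)

-- ===== LEMMAS AND PROOFS =====

-- A's loop over the suffix equals the conjunction of B's per-rule passes on it.
set_option maxHeartbeats 1600000 in
theorem aLoop_eq (rest : List Char) (prev : Char) :
    aLoop prev rest =
      (rest.all (fun c => c = ' ' || PySem.Chars.islower c || isSeparatorC c || isTerminalC c)
       && ((prev :: rest).zip rest).all (fun p => !(p.1 = ' ') || !(p.2 = ' '))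
       && (rest.zip rest.tail).all (fun p => !(p.1 = ' ') || PySem.Chars.islower p.2)
       && ((prev :: rest).zip rest).all (fun p => !(isTerminalC p.2) || !(p.1 = ' '))
       && !(rest.dropLast.any isTerminalC)) := by
  induction rest generalizing prev with
  | nil => rfl
  | cons c tail ih =>
    cases tail with
    | nil =>
      show (if c = ' ' then if prev = ' ' then false else aLoop c []
            else if isTerminalC c then
              if prev = ' ' then false else if ([] : List Char) ≠ [] then false else aLoop c []
            else if PySem.Chars.islower c || isSeparatorC c then aLoop c [] else false) = _
      by_cases hc : c = ' ' <;> by_cases hp : prev = ' ' <;>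
        simp_all [isTerminalC, aLoop] <;>
        (first | rfl | (rw [Bool.eq_iff_iff]; simp only [Bool.and_eq_true, Bool.or_eq_true, Bool.not_eq_true', decide_eq_true_eq, decide_eq_false_iff_not]; tauto))
    | cons d tl =>
      show (if c = ' ' then
              if prev = ' ' then false
              else if !(PySem.Chars.islower d) then false else aLoop c (d :: tl)
            else if isTerminalC c then
              if prev = ' ' then false else if (d :: tl) ≠ [] then false else aLoop c (d :: tl)
            else if PySem.Chars.islower c || isSeparatorC c then aLoop c (d :: tl) else false) = _
      rw [ih c]
      by_cases hc : c = ' ' <;> by_cases hp : prev = ' ' <;>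
        by_cases hd : d = ' ' <;> by_cases hld : PySem.Chars.islower d = true <;>
        simp_all [isTerminalC] <;>
        (first | rfl | (rw [Bool.eq_iff_iff]; simp only [Bool.and_eq_true, Bool.or_eq_true, Bool.not_eq_true', decide_eq_true_eq, decide_eq_false_iff_not]; tauto))

-- ===== VERDICT (by name: the statement is the Claim_ definition above) =====
set_option maxHeartbeats 1600000 in
theorem is_valid_sentence_spec : Claim_equal_is_valid_sentence := by
  intro sentence _
  unfold Spec_is_valid_sentence is_valid_sentence is_valid_sentence_alt
  cases h : sentence.toList with
  | nil => rfl
  | cons c0 rest =>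
    cases rest with
    | nil =>
      show (if !(PySem.Chars.isupper c0) then false else isTerminalC c0) = _
      by_cases hu : PySem.Chars.isupper c0 = true <;> simp_all [isTerminalC]
    | cons c1 tl =>
      show (if !(PySem.Chars.isupper c0) then false
            else if !(PySem.Chars.islower c1 || c1 = ' ') then false
            else if aLoop c0 (c1 :: tl) then isTerminalC ((c1 :: tl).getLastD c0) else false) = _
      rw [aLoop_eq]
      by_cases hu : PySem.Chars.isupper c0 = true <;>
        by_cases h2 : (PySem.Chars.islower c1 || c1 = ' ') = true <;>
        simp_all <;>
        (first | rfl | (rw [Bool.eq_iff_iff]; simp only [Bool.and_eq_true, Bool.or_eq_true, Bool.not_eq_true', decide_eq_true_eq, decide_eq_false_iff_not]; tauto))
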